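-- pv_equiv track=rewrite | github.com/Lucero6886/fixed-point-arithmetic-asic-ready | model/sc_schedule_generator.py | _polar_encode_terms_recursive
-- ===== SOURCE A (Python) =====
-- from typing import List, Sequence, Set
--
-- def xor_terms(a: Set[str], b: Set[str]) -> Set[str]:
--     """GF(2) XOR of symbolic term sets using symmetric difference."""
--     return set(a.symmetric_difference(b))
--
-- def _polar_encode_terms_recursive(terms: Sequence[Set[str]]) -> List[Set[str]]:
--     n = len(terms)
--     if n == 1:
--         return [set(terms[0])]
--
--     half = n // 2
--
--     upper = [
--         xor_terms(terms[i], terms[i + half])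
--         for i in range(half)
--     ]
--     lower = [
--         set(terms[i + half])
--         for i in range(half)
--     ]
--
--     return _polar_encode_terms_recursive(upper) + _polar_encode_terms_recursive(lower)
-- ===== SOURCE B (Python) =====
-- from typing import List, Sequence, Set
--
-- def _polar_encode_terms_recursive(terms: Sequence[Set[str]]) -> List[Set[str]]:
--     result: List[Set[str]] = []
--     stack = [list(terms)]
--     while stack:
--         seg = stack.pop()
--         if len(seg) == 1:
--             result.append(set(seg[0]))
--         else:
--             half = len(seg) // 2
--             upper = [set(seg[i].symmetric_difference(seg[i + half])) for i in range(half)]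
--             lower = [set(seg[i + half]) for i in range(half)]
--             stack.append(lower)
--             stack.append(upper)
--     return result
-- ===== Notes on version B (the rewrite author's own statement) =====
-- stated objective: alternative
-- what changed: Replaces the divide-and-conquer recursion by an iterative loop over an explicit LIFO stack of segments that appends base segments to an accumulator, pushing the lower half before the upper half so upper is processed first.
import Mathlib
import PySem

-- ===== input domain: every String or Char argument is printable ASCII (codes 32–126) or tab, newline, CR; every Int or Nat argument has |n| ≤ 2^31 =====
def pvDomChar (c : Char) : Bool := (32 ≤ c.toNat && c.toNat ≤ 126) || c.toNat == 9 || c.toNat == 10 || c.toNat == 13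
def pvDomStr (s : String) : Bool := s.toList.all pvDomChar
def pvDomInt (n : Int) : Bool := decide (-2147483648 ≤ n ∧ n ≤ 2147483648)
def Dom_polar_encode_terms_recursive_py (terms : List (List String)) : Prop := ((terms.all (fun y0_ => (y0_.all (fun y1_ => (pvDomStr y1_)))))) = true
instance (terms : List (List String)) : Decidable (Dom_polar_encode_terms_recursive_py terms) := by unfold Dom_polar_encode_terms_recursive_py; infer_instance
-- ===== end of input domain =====

-- B replaces A's divide-and-conquer recursion by an iterative explicit-stack loop with an
-- accumulator (alternative decomposition, same cost).

-- ===== PORT A =====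
-- xor_terms: set(a.symmetric_difference(b))
def pvXorTerms (a b : List String) : List String :=
  PySem.Set.ofList (PySem.Set.symmDiff a b)

def polar_encode_terms_recursive_py (terms : List (List String)) : List (List String) :=
  if terms.length = 1 then
    [PySem.Set.ofList (terms.getD 0 [])]
  else if terms.length = 0 then
    []  -- totality guard: the Python recurses forever on an empty sequence (outside Pre_)
  else
    let half := terms.length / 2
    let upper := (List.range half).map (fun i => pvXorTerms (terms.getD i []) (terms.getD (i + half) []))
    let lower := (List.range half).map (fun i => PySem.Set.ofList (terms.getD (i + half) []))
    polar_encode_terms_recursive_py upper ++ polar_encode_terms_recursive_py lower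
termination_by terms.length
decreasing_by
  all_goals simp only [List.length_map, List.length_range]
  all_goals omega

-- ===== PORT B =====
-- the stack loop of Source B: pop a segment; length-1 segments are appended to the result,
-- longer segments are split and the two halves pushed (lower first, then upper).
def pvPolarStack (stack : List (List (List String))) (result : List (List String)) : List (List String) :=
  match stack with
  | [] => result
  | seg :: rest =>
    if seg.length = 1 then
      pvPolarStack rest (result ++ [PySem.Set.ofList (seg.getD 0 [])])
    else if seg.length = 0 then
      pvPolarStack rest result  -- totality guard: the Python loops forever on an empty segment (outside Pre_)
    else
      let half := seg.length / 2
      let upper := (List.range half).map (fun i => PySem.Set.ofList (PySem.Set.symmDiff (seg.getD i []) (seg.getD (i + half) [])))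
      let lower := (List.range half).map (fun i => PySem.Set.ofList (seg.getD (i + half) []))
      pvPolarStack (upper :: lower :: rest) result
termination_by (stack.map (fun s => if s.length = 0 then 1 else 2 * s.length - 1)).sum
decreasing_by
  all_goals simp only [List.map_cons, List.sum_cons, List.length_map, List.length_range]
  all_goals split_ifs <;> omega

def polar_encode_terms_recursive_py_alt (terms : List (List String)) : List (List String) :=
  pvPolarStack [terms] []

-- ===== PRECONDITION & SPEC =====
-- Pre_ excludes only the empty list, on which Python A raises RecursionError (and B loops).
def Pre_polar_encode_terms_recursive_py (terms : List (List String)) : Prop := terms ≠ []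
instance (terms : List (List String)) : Decidable (Pre_polar_encode_terms_recursive_py terms) := by
  unfold Pre_polar_encode_terms_recursive_py; infer_instance

def pvWitness_polar_encode_terms_recursive_py : List (List String) := [["x"], ["y", "z"]]

def Spec_polar_encode_terms_recursive_py (terms : List (List String)) (out : List (List String)) : Prop :=
  out = polar_encode_terms_recursive_py_alt terms
instance (terms : List (List String)) (out : List (List String)) : Decidable (Spec_polar_encode_terms_recursive_py terms out) := by
  unfold Spec_polar_encode_terms_recursive_py; infer_instance

-- ===== CLAIM (what is proved, stated in full; the proofs are below) =====
def Claim_equal_polar_encode_terms_recursive_py : Prop := ∀ (terms : List (List String)), Dom_polar_encode_terms_recursive_py terms → Pre_polar_encode_terms_recursive_py terms → Spec_polar_encode_terms_recursive_py terms (polar_encode_terms_recursive_py terms)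

-- ===== LEMMAS AND PROOFS =====

-- popping a nonempty segment off the stack appends exactly A's encoding of it to the result
lemma pvPolarStack_cons :
    ∀ (n : Nat) (seg : List (List String)), seg.length = n → seg ≠ [] →
      ∀ (rest : List (List (List String))) (result : List (List String)),
        pvPolarStack (seg :: rest) result =
          pvPolarStack rest (result ++ polar_encode_terms_recursive_py seg) := by
  intro n
  induction n using Nat.strong_induction_on with
  | _ n ih =>
    intro seg hlen hne rest result
    by_cases h1 : seg.length = 1
    · rw [pvPolarStack, polar_encode_terms_recursive_py]
      simp [h1]
    · have h0 : seg.length ≠ 0 := by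
        intro h; exact hne (List.length_eq_zero_iff.mp h)
      rw [pvPolarStack, polar_encode_terms_recursive_py]
      simp only [h1, h0, if_false]
      have hhalf1 : 1 ≤ seg.length / 2 := by omega
      have hhalflt : seg.length / 2 < n := by omega
      set half := seg.length / 2 with hhalf
      set upper := (List.range half).map (fun i => PySem.Set.ofList (PySem.Set.symmDiff (seg.getD i []) (seg.getD (i + half) []))) with hup
      set lower := (List.range half).map (fun i => PySem.Set.ofList (seg.getD (i + half) [])) with hlo
      have hul : upper.length = half := by simp [hup]
      have hll : lower.length = half := by simp [hlo]
      have hune : upper ≠ [] := by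
        intro h; rw [h] at hul; simp at hul; omega
      have hlne : lower ≠ [] := by
        intro h; rw [h] at hll; simp at hll; omega
      rw [ih half (by omega) upper hul hune, ih half (by omega) lower hll hlne,
          List.append_assoc]
      congr 2

-- ===== VERDICT (by name: the statement is the Claim_ definition above) =====
theorem polar_encode_terms_recursive_py_spec : Claim_equal_polar_encode_terms_recursive_py := by
  intro terms _ hpre
  unfold Spec_polar_encode_terms_recursive_py polar_encode_terms_recursive_py_alt
  rw [pvPolarStack_cons terms.length terms rfl hpre [] []]
  rw [pvPolarStack]
  simp
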